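-- pv_equiv track=rewrite | github.com/chrishayuk/chuk-code-raptor | examples/parsing/json_parsing_demo.py | detect_json_patterns
-- ===== SOURCE A (Python) =====
-- from typing import Dict, List, Any
--
-- def detect_json_patterns(obj) -> List[str]:
--     """Detect common JSON patterns and structures"""
--     patterns = []
--
--     if isinstance(obj, dict):
--         keys = set(obj.keys())
--
--         # Common ID patterns
--         if any(id_key in keys for id_key in ['id', 'uuid', '_id', 'identifier']):
--             patterns.append('has_identifier')
--
--         # Timestamp patterns
--         if any(time_key in keys for time_key in ['created_at', 'updated_at', 'timestamp', 'date']):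
--             patterns.append('timestamped')
--
--         # Metadata patterns
--         if any(meta_key in keys for meta_key in ['metadata', 'meta', 'info']):
--             patterns.append('has_metadata')
--
--         # Configuration patterns
--         if any(config_key in keys for config_key in ['config', 'settings', 'options', 'preferences']):
--             patterns.append('configuration')
--
--         # API response patterns
--         if any(api_key in keys for api_key in ['status', 'data', 'result', 'response']):
--             patterns.append('api_response')
--
--         # Schema patterns
--         if any(schema_key in keys for schema_key in ['$schema', 'type', 'properties', 'required']):
--             patterns.append('json_schema')
--
--         # Pagination patterns
--         if any(page_key in keys for page_key in ['page', 'pagination', 'offset', 'limit']):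
--             patterns.append('paginated')
--
--         # Reference patterns
--         if any(ref_key in keys for ref_key in ['$ref', 'ref', 'references', 'links']):
--             patterns.append('has_references')
--
--     return patterns
-- ===== SOURCE B (Python) =====
-- _PATTERN_INDEX = {
--     'id': 'has_identifier', 'uuid': 'has_identifier', '_id': 'has_identifier', 'identifier': 'has_identifier',
--     'created_at': 'timestamped', 'updated_at': 'timestamped', 'timestamp': 'timestamped', 'date': 'timestamped',
--     'metadata': 'has_metadata', 'meta': 'has_metadata', 'info': 'has_metadata',
--     'config': 'configuration', 'settings': 'configuration', 'options': 'configuration', 'preferences': 'configuration',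
--     'status': 'api_response', 'data': 'api_response', 'result': 'api_response', 'response': 'api_response',
--     '$schema': 'json_schema', 'type': 'json_schema', 'properties': 'json_schema', 'required': 'json_schema',
--     'page': 'paginated', 'pagination': 'paginated', 'offset': 'paginated', 'limit': 'paginated',
--     '$ref': 'has_references', 'ref': 'has_references', 'references': 'has_references', 'links': 'has_references',
-- }
-- _CANONICAL = ['has_identifier', 'timestamped', 'has_metadata', 'configuration',
--               'api_response', 'json_schema', 'paginated', 'has_references']
--
-- def detect_json_patterns(obj):
--     if not isinstance(obj, dict):
--         return []
--     found = set()
--     for key in obj: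
--         label = _PATTERN_INDEX.get(key)
--         if label is not None:
--             found.add(label)
--     return [label for label in _CANONICAL if label in found]
-- ===== Notes on version B (the rewrite author's own statement) =====
-- stated objective: idiomatic
-- what changed: Replaces A's eight hard-coded any(key in keys) scans with a single inverted-index dict mapping each trigger key to its pattern label, one lookup per object key collecting labels into a set, then a filter of a canonical label list to reproduce A's fixed output order.
import Mathlib
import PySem

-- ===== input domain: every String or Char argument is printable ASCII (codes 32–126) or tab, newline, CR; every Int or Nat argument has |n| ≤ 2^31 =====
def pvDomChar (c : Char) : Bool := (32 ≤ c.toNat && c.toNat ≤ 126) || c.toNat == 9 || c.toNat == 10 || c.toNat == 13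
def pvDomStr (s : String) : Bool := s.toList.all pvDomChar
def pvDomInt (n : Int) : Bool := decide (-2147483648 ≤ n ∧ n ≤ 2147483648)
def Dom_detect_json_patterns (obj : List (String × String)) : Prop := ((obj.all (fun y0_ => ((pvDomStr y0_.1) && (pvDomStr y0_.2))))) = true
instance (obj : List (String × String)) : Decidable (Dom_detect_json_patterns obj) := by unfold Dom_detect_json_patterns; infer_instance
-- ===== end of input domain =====

-- B replaces A's eight hard-coded any(... in keys ...) scans by an inverted index
-- (trigger key → pattern label) looked up once per object key, then filters a
-- canonical label list; idiomatic/alternative, no speed claim.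

-- ===== PORT A =====
def detect_json_patterns (obj : List (String × String)) : List String :=
  -- obj is a dict (assoc list); the isinstance(obj, dict) branch is always taken.
  let keys : PySem.Set String := PySem.Set.ofList (obj.map Prod.fst)
  let patterns : List String := []
  let patterns := if (["id", "uuid", "_id", "identifier"].any (fun k => keys.contains k)) then patterns ++ ["has_identifier"] else patterns
  let patterns := if (["created_at", "updated_at", "timestamp", "date"].any (fun k => keys.contains k)) then patterns ++ ["timestamped"] else patterns
  let patterns := if (["metadata", "meta", "info"].any (fun k => keys.contains k)) then patterns ++ ["has_metadata"] else patterns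
  let patterns := if (["config", "settings", "options", "preferences"].any (fun k => keys.contains k)) then patterns ++ ["configuration"] else patterns
  let patterns := if (["status", "data", "result", "response"].any (fun k => keys.contains k)) then patterns ++ ["api_response"] else patterns
  let patterns := if (["$schema", "type", "properties", "required"].any (fun k => keys.contains k)) then patterns ++ ["json_schema"] else patterns
  let patterns := if (["page", "pagination", "offset", "limit"].any (fun k => keys.contains k)) then patterns ++ ["paginated"] else patterns
  let patterns := if (["$ref", "ref", "references", "links"].any (fun k => keys.contains k)) then patterns ++ ["has_references"] else patterns
  patterns

-- ===== PORT B =====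
def pvPatternPairs : List (String × String) :=
  [("id", "has_identifier"), ("uuid", "has_identifier"), ("_id", "has_identifier"), ("identifier", "has_identifier"),
   ("created_at", "timestamped"), ("updated_at", "timestamped"), ("timestamp", "timestamped"), ("date", "timestamped"),
   ("metadata", "has_metadata"), ("meta", "has_metadata"), ("info", "has_metadata"),
   ("config", "configuration"), ("settings", "configuration"), ("options", "configuration"), ("preferences", "configuration"),
   ("status", "api_response"), ("data", "api_response"), ("result", "api_response"), ("response", "api_response"),
   ("$schema", "json_schema"), ("type", "json_schema"), ("properties", "json_schema"), ("required", "json_schema"),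
   ("page", "paginated"), ("pagination", "paginated"), ("offset", "paginated"), ("limit", "paginated"),
   ("$ref", "has_references"), ("ref", "has_references"), ("references", "has_references"), ("links", "has_references")]

def pvPatternIndex : PySem.Dict String String := PySem.Dict.ofList pvPatternPairs

def pvCanonical : List String :=
  ["has_identifier", "timestamped", "has_metadata", "configuration",
   "api_response", "json_schema", "paginated", "has_references"]

def detect_json_patterns_alt (obj : List (String × String)) : List String :=
  let found : PySem.Set String :=
    obj.foldl (fun s kv =>
      match pvPatternIndex.get? kv.1 with
      | some label => PySem.Set.add s label
      | none => s) PySem.Set.empty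
  pvCanonical.filter (fun l => found.contains l)

-- ===== PRECONDITION & SPEC =====
def Spec_detect_json_patterns (obj : List (String × String)) (out : List String) : Prop := out = detect_json_patterns_alt obj
instance (obj : List (String × String)) (out : List String) : Decidable (Spec_detect_json_patterns obj out) := by unfold Spec_detect_json_patterns; infer_instance

-- ===== CLAIM (what is proved, stated in full; the proofs are below) =====
def Claim_equal_detect_json_patterns : Prop := ∀ (obj : List (String × String)), Dom_detect_json_patterns obj → Spec_detect_json_patterns obj (detect_json_patterns obj)

-- ===== LEMMAS AND PROOFS =====

-- membership in B's accumulated set of labels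
theorem mem_found (obj : List (String × String)) (s : PySem.Set String) (l : String) :
    l ∈ obj.foldl (fun s kv =>
      match pvPatternIndex.get? kv.1 with
      | some label => PySem.Set.add s label
      | none => s) s ↔ l ∈ s ∨ ∃ kv, kv ∈ obj ∧ pvPatternIndex.get? kv.1 = some l := by
  induction obj generalizing s with
  | nil => simp
  | cons kv rest ih =>
    simp only [List.foldl_cons]
    cases h : pvPatternIndex.get? kv.1 with
    | none =>
      rw [ih]
      constructor
      · rintro (hs | ⟨a, ha, hb⟩)
        · exact Or.inl hs
        · exact Or.inr ⟨a, List.mem_cons_of_mem _ ha, hb⟩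
      · rintro (hs | ⟨a, ha, hb⟩)
        · exact Or.inl hs
        · rcases List.mem_cons.1 ha with rfl | ha'
          · rw [h] at hb; cases hb
          · exact Or.inr ⟨a, ha', hb⟩
    | some lab =>
      rw [ih]
      constructor
      · rintro (hs | ⟨a, ha, hb⟩)
        · rcases (PySem.Set.mem_add _ _ _).1 hs with hs' | rfl
          · exact Or.inl hs'
          · exact Or.inr ⟨kv, List.mem_cons_self, h⟩
        · exact Or.inr ⟨a, List.mem_cons_of_mem _ ha, hb⟩
      · rintro (hs | ⟨a, ha, hb⟩)
        · exact Or.inl ((PySem.Set.mem_add _ _ _).2 (Or.inl hs))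
        · rcases List.mem_cons.1 ha with rfl | ha'
          · rw [h] at hb; injection hb with hb
            exact Or.inl ((PySem.Set.mem_add _ _ _).2 (Or.inr hb.symm))
          · exact Or.inr ⟨a, ha', hb⟩

-- first-match lookup in a dict literal with distinct keys is list membership
theorem get?_mk_of_nodup (pairs : List (String × String))
    (hn : (pairs.map Prod.fst).Nodup) (k l : String) :
    (PySem.Dict.mk pairs).get? k = some l ↔ (k, l) ∈ pairs := by
  induction pairs with
  | nil => simp [PySem.Dict.get?]
  | cons p rest ih =>
    obtain ⟨a, b⟩ := p
    simp only [List.map_cons, List.nodup_cons] at hn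
    rw [PySem.Dict.get?_mk_cons]
    by_cases hak : a = k
    · subst hak
      rw [if_pos (by simp)]
      simp only [List.mem_cons, Option.some.injEq, Prod.mk.injEq, true_and]
      constructor
      · intro hb; exact Or.inl hb.symm
      · rintro (rfl | hmem)
        · rfl
        · exact absurd (List.mem_map_of_mem (f := Prod.fst) hmem) hn.1
    · rw [if_neg (by simp [hak]), ih hn.2]
      simp [Prod.ext_iff, Ne.symm hak]

theorem get?_index (k l : String) :
    pvPatternIndex.get? k = some l ↔ (k, l) ∈ pvPatternPairs := by
  have hmk : pvPatternIndex = PySem.Dict.mk pvPatternPairs := by decide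
  rw [hmk]
  exact get?_mk_of_nodup _ (by decide) k l

theorem cond_eq (obj : List (String × String)) (group : List String) (l : String)
    (hg : ∀ p ∈ pvPatternPairs, p.2 = l ↔ p.1 ∈ group)
    (hgm : ∀ k ∈ group, (k, l) ∈ pvPatternPairs) :
    (group.any (fun k => (PySem.Set.ofList (obj.map Prod.fst)).contains k)) =
    ((obj.foldl (fun s kv =>
      match pvPatternIndex.get? kv.1 with
      | some label => PySem.Set.add s label
      | none => s) PySem.Set.empty).contains l) := by
  rw [Bool.eq_iff_iff]
  simp only [List.any_eq_true, PySem.Set.contains, List.contains_iff_mem]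
  rw [mem_found]
  constructor
  · rintro ⟨k, hk, hmem⟩
    rw [PySem.Set.mem_ofList] at hmem
    simp only [List.mem_map] at hmem
    obtain ⟨kv, hkv, rfl⟩ := hmem
    exact Or.inr ⟨kv, hkv, (get?_index _ _).2 (hgm _ hk)⟩
  · rintro (hs | ⟨kv, hkv, hget⟩)
    · exact absurd hs (by simp [PySem.Set.empty])
    · rw [get?_index] at hget
      refine ⟨kv.1, (hg _ hget).1 rfl, ?_⟩
      rw [PySem.Set.mem_ofList]
      exact List.mem_map_of_mem hkv

-- ===== VERDICT (by name: the statement is the Claim_ definition above) =====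
theorem detect_json_patterns_spec : Claim_equal_detect_json_patterns := by
  intro obj _
  unfold Spec_detect_json_patterns detect_json_patterns detect_json_patterns_alt
  have h1 := cond_eq obj ["id", "uuid", "_id", "identifier"] "has_identifier" (by decide) (by decide)
  have h2 := cond_eq obj ["created_at", "updated_at", "timestamp", "date"] "timestamped" (by decide) (by decide)
  have h3 := cond_eq obj ["metadata", "meta", "info"] "has_metadata" (by decide) (by decide)
  have h4 := cond_eq obj ["config", "settings", "options", "preferences"] "configuration" (by decide) (by decide)
  have h5 := cond_eq obj ["status", "data", "result", "response"] "api_response" (by decide) (by decide)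
  have h6 := cond_eq obj ["$schema", "type", "properties", "required"] "json_schema" (by decide) (by decide)
  have h7 := cond_eq obj ["page", "pagination", "offset", "limit"] "paginated" (by decide) (by decide)
  have h8 := cond_eq obj ["$ref", "ref", "references", "links"] "has_references" (by decide) (by decide)
  simp only [pvCanonical, List.filter]
  rw [← h1, ← h2, ← h3, ← h4, ← h5, ← h6, ← h7, ← h8]
  cases ["id", "uuid", "_id", "identifier"].any (fun k => (PySem.Set.ofList (obj.map Prod.fst)).contains k) <;>
  cases ["created_at", "updated_at", "timestamp", "date"].any (fun k => (PySem.Set.ofList (obj.map Prod.fst)).contains k) <;>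
  cases ["metadata", "meta", "info"].any (fun k => (PySem.Set.ofList (obj.map Prod.fst)).contains k) <;>
  cases ["config", "settings", "options", "preferences"].any (fun k => (PySem.Set.ofList (obj.map Prod.fst)).contains k) <;>
  cases ["status", "data", "result", "response"].any (fun k => (PySem.Set.ofList (obj.map Prod.fst)).contains k) <;>
  cases ["$schema", "type", "properties", "required"].any (fun k => (PySem.Set.ofList (obj.map Prod.fst)).contains k) <;>
  cases ["page", "pagination", "offset", "limit"].any (fun k => (PySem.Set.ofList (obj.map Prod.fst)).contains k) <;>
  cases ["$ref", "ref", "references", "links"].any (fun k => (PySem.Set.ofList (obj.map Prod.fst)).contains k) <;>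
  rfl
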